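-- pv_equiv track=rewrite | github.com/syedshubha/quantum-bug-rag | src/bugs4q_labels.py | _match_case_path
-- ===== SOURCE A (Python) =====
-- def _normalise_rel_path(path_value: str) -> str | None:
--     value = path_value.strip()
--     if not value:
--         return None
--     value = value.lstrip("./")
--     value = value.rstrip("/")
--     return value or None
--
-- def _match_case_path(sample_path: str, case_paths: list[str]) -> str | None:
--     normalized_sample_path = _normalise_rel_path(sample_path)
--     if normalized_sample_path is None:
--         return None
--
--     for case_path in case_paths:
--         if normalized_sample_path == case_path:
--             return case_path
--         if normalized_sample_path.startswith(case_path + "/"):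
--             return case_path
--     return None
-- ===== SOURCE B (Python) =====
-- def _normalise_rel_path(path_value: str) -> str | None:
--     value = path_value.strip()
--     if not value:
--         return None
--     value = value.lstrip("./")
--     value = value.rstrip("/")
--     return value or None
--
-- def _match_case_path(sample_path: str, case_paths: list[str]) -> str | None:
--     normalized = _normalise_rel_path(sample_path)
--     if normalized is None:
--         return None
--     # index each case path by its first position; then walk the '/'-boundary
--     # prefixes of the sample and keep the candidate with the smallest position.
--     first_index = {}
--     for i, cp in enumerate(case_paths):
--         if cp not in first_index:
--             first_index[cp] = i
--     best = None  # (position in case_paths, matching string)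
--     for j, ch in enumerate(normalized):
--         if ch == "/":
--             i = first_index.get(normalized[:j])
--             if i is not None and (best is None or i < best[0]):
--                 best = (i, normalized[:j])
--     i = first_index.get(normalized)
--     if i is not None and (best is None or i < best[0]):
--         best = (i, normalized)
--     return None if best is None else best[1]
-- ===== Notes on version B (the rewrite author's own statement) =====
-- stated objective: alternative
-- what changed: B inverts the search: it builds a dict mapping each case_path to its first position (one pass over case_paths), then iterates over the '/'-boundary prefixes of the normalized sample, looking each prefix up in the dict and keeping the candidate with the smallest position; A instead scans case_paths in order testing equality/startswith per element.
import Mathlib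
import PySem

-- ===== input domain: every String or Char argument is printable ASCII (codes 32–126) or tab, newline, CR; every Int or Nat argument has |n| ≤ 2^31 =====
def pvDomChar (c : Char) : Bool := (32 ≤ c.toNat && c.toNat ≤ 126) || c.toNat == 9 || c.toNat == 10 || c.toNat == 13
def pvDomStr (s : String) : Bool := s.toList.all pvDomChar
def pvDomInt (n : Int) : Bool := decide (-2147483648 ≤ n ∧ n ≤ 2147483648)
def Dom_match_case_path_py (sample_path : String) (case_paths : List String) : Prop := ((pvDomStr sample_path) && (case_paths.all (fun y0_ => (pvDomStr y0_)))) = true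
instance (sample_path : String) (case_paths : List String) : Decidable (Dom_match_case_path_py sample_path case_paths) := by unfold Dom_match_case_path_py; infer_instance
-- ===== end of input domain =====

-- B inverts A's search: a dict of first positions of case_paths, then a walk over the
-- sample's '/'-boundary prefixes keeping the candidate with the smallest position.


-- ===== PORT A =====
-- shared helper: _normalise_rel_path, used verbatim by both Pythons.
-- lstrip("./") / rstrip("/") are ported by hand (exact: Python strips all leading/trailing
-- characters belonging to the given set).
def normaliseRelPath (path_value : List Char) : Option (List Char) :=
  let value := PySem.Chars.strip path_value
  if value = [] then none
  else
    let value := value.dropWhile (fun c => c == '.' || c == '/')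
    let value := (value.reverse.dropWhile (fun c => c == '/')).reverse
    if value = [] then none else some value

-- A's for-loop over case_paths
def matchLoopA (n : List Char) : List String → Option String
  | [] => none
  | cp :: rest =>
    if n = cp.toList then some cp
    else if PySem.Chars.startswith n (cp.toList ++ ['/']) then some cp
    else matchLoopA n rest

def match_case_path_py (sample_path : String) (case_paths : List String) : Option String :=
  match normaliseRelPath sample_path.toList with
  | none => none
  | some n => matchLoopA n case_paths

-- ===== PORT B =====
-- first_index = {}; for i, cp in enumerate(case_paths): if cp not in first_index: first_index[cp] = i
def firstIndexB (cps : List String) : PySem.Dict String Int :=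
  (PySem.List.enumerate cps 0).foldl
    (fun d p => if PySem.Dict.contains d p.2 then d else PySem.Dict.insert d p.2 p.1)
    PySem.Dict.empty

-- i = first_index.get(key); if i is not None and (best is None or i < best[0]): best = (i, key)
def considerB (d : PySem.Dict String Int) (best : Option (Int × String)) (key : List Char) :
    Option (Int × String) :=
  match PySem.Dict.get? d (String.ofList key) with
  | none => best
  | some i =>
    match best with
    | none => some (i, String.ofList key)
    | some b => if i < b.1 then some (i, String.ofList key) else best

def match_case_path_py_alt (sample_path : String) (case_paths : List String) : Option String :=
  match normaliseRelPath sample_path.toList with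
  | none => none
  | some n =>
    let d := firstIndexB case_paths
    let best := (PySem.List.enumerate n 0).foldl
      (fun best p =>
        if p.2 == '/' then considerB d best (PySem.Chars.slice n none (some p.1)) else best)
      none
    let best := considerB d best n
    match best with
    | none => none
    | some b => some b.2

-- ===== PRECONDITION & SPEC =====
def Spec_match_case_path_py (sample_path : String) (case_paths : List String) (out : Option String) : Prop := out = match_case_path_py_alt sample_path case_paths
instance (sample_path : String) (case_paths : List String) (out : Option String) : Decidable (Spec_match_case_path_py sample_path case_paths out) := by unfold Spec_match_case_path_py; infer_instance

-- ===== CLAIM (what is proved, stated in full; the proofs are below) =====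
def Claim_equal_match_case_path_py : Prop := ∀ (sample_path : String) (case_paths : List String), Dom_match_case_path_py sample_path case_paths → Spec_match_case_path_py sample_path case_paths (match_case_path_py sample_path case_paths)

-- ===== LEMMAS AND PROOFS =====

-- A's loop is a find? with a boolean test
theorem matchLoopA_eq_find (n : List Char) (cps : List String) :
    matchLoopA n cps =
      cps.find? (fun cp => (n == cp.toList) || PySem.Chars.startswith n (cp.toList ++ ['/'])) := by
  induction cps with
  | nil => rfl
  | cons cp rest ih =>
    rw [matchLoopA, List.find?_cons]
    by_cases h1 : n = cp.toList
    · simp [h1]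
    · have hb : (n == cp.toList) = false := beq_eq_false_iff_ne.mpr h1
      by_cases h2 : PySem.Chars.startswith n (cp.toList ++ ['/']) = true
      · simp [h1, hb, h2]
      · have hb2 : PySem.Chars.startswith n (cp.toList ++ ['/']) = false := by
          simpa using h2
        simp [h1, hb, hb2, ih]

-- the setdefault-style fold: lookup = first index of the key (shifted by the enumerate base)
theorem get?_enumFold (cps : List String) (b : Int) (d : PySem.Dict String Int) (s : String) :
    ((PySem.List.enumerate cps b).foldl
        (fun d p => if PySem.Dict.contains d p.2 = true then d else PySem.Dict.insert d p.2 p.1)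
        d).get? s
      = (d.get? s).or
          ((List.findIdx? (fun cp => cp == s) cps).map (fun k : Nat => b + (k : Int))) := by
  induction cps generalizing b d with
  | nil => simp [PySem.List.enumerate_nil]
  | cons cp rest ih =>
    rw [PySem.List.enumerate_cons, List.foldl_cons, ih, List.findIdx?_cons]
    by_cases hc : cp = s
    · subst hc
      by_cases hd : PySem.Dict.contains d cp = true
      · have hvs : (d.get? cp).isSome = true := by
          rw [← PySem.Dict.contains_eq_isSome_get?]
          exact hd
        obtain ⟨v, hv⟩ := Option.isSome_iff_exists.mp hvs
        simp [hd, hv]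
      · have hnone : d.get? cp = none := by
          rw [PySem.Dict.contains_eq_isSome_get?] at hd
          exact Option.not_isSome_iff_eq_none.mp (by simpa using hd)
        simp [hd, hnone, PySem.Dict.get?_insert_self]
    · have hbeq : (cp == s) = false := beq_eq_false_iff_ne.mpr hc
      have hcs : ¬ s = cp := fun h => hc h.symm
      by_cases hd : PySem.Dict.contains d cp = true
      · simp [hd, hbeq, Option.map_map]
        congr 1
        congr 1
        funext k
        simp only [Function.comp_apply]
        push_cast
        ring
      · simp [hd, hbeq, PySem.Dict.get?_insert, hcs, Option.map_map]
        congr 1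
        congr 1
        funext k
        simp only [Function.comp_apply]
        push_cast
        ring

theorem get?_firstIndexB (cps : List String) (s : String) :
    (firstIndexB cps).get? s
      = (List.findIdx? (fun cp => cp == s) cps).map (fun k : Nat => (k : Int)) := by
  rw [firstIndexB, get?_enumFold]
  simp

-- the proof-side "keep the smaller first component" step
def minCand (b : Option (Int × String)) (c : Int × String) : Option (Int × String) :=
  match b with
  | none => some c
  | some p => if c.1 < p.1 then some c else some p

-- the candidate list of a key list K under dict d
def candsOf (d : PySem.Dict String Int) (K : List (List Char)) : List (Int × String) :=
  K.filterMap (fun x => (PySem.Dict.get? d (String.ofList x)).map (fun i => (i, String.ofList x)))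

theorem foldl_considerB_eq (d : PySem.Dict String Int) (K : List (List Char))
    (b : Option (Int × String)) :
    K.foldl (considerB d) b = (candsOf d K).foldl minCand b := by
  induction K generalizing b with
  | nil => rfl
  | cons x K ih =>
    rw [List.foldl_cons]
    cases hx : PySem.Dict.get? d (String.ofList x) with
    | none =>
      have h1 : considerB d b x = b := by unfold considerB; rw [hx]
      have h2 : candsOf d (x :: K) = candsOf d K := by
        unfold candsOf
        simp [hx]
      rw [h1, h2, ih]
    | some i =>
      have h1 : considerB d b x = minCand b (i, String.ofList x) := by
        unfold considerB
        rw [hx]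
        cases b <;> simp [minCand]
      have h2 : candsOf d (x :: K) = (i, String.ofList x) :: candsOf d K := by
        unfold candsOf
        simp [hx]
      rw [h1, h2, ih, List.foldl_cons]

theorem foldl_minCand_stay (C : List (Int × String)) (p : Int × String)
    (h : ∀ c ∈ C, ¬ c.1 < p.1) : C.foldl minCand (some p) = some p := by
  induction C with
  | nil => rfl
  | cons c C ih =>
    rw [List.foldl_cons]
    have h1 : minCand (some p) c = some p := by
      simp only [minCand]
      rw [if_neg (h c List.mem_cons_self)]
    rw [h1]
    exact ih (fun e he => h e (List.mem_cons_of_mem _ he))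

theorem foldl_minCand_min (C : List (Int × String)) (m : Int × String)
    (hmin : ∀ c ∈ C, c = m ∨ m.1 < c.1) (hm : m ∈ C) :
    ∀ b, (b = none ∨ ∃ p, b = some p ∧ m.1 < p.1) → C.foldl minCand b = some m := by
  induction C with
  | nil => cases hm
  | cons c C ih =>
    intro b hb
    rw [List.foldl_cons]
    by_cases hcm : c = m
    · subst hcm
      have hb' : minCand b c = some c := by
        rcases hb with rfl | ⟨p, rfl, hlt⟩
        · rfl
        · simp only [minCand]
          rw [if_pos hlt]
      rw [hb']
      refine foldl_minCand_stay C c (fun e he => ?_)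
      rcases hmin e (List.mem_cons_of_mem _ he) with rfl | hlt
      · exact lt_irrefl _
      · exact fun h' => absurd (lt_trans hlt h') (lt_irrefl _)
    · have hm' : m ∈ C := by
        rcases List.mem_cons.mp hm with rfl | h
        · exact absurd rfl hcm
        · exact h
      have hmc : m.1 < c.1 := by
        rcases hmin c List.mem_cons_self with h | h
        · exact absurd h hcm
        · exact h
      refine ih (fun e he => hmin e (List.mem_cons_of_mem _ he)) hm' _ ?_
      rcases hb with rfl | ⟨p, rfl, hlt⟩
      · exact Or.inr ⟨c, rfl, hmc⟩
      · simp only [minCand]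
        split_ifs with h
        · exact Or.inr ⟨c, rfl, hmc⟩
        · exact Or.inr ⟨p, rfl, hlt⟩

theorem slashPrefix_iff (n cs : List Char) :
    cs ++ ['/'] <+: n ↔ ∃ k, ∃ h : k < n.length, n[k] = '/' ∧ cs = n.take k := by
  constructor
  · rintro ⟨t, ht⟩
    refine ⟨cs.length, ?_, ?_, ?_⟩
    · subst ht; simp
    · subst ht; simp
    · subst ht; simp
  · rintro ⟨k, hk, hs, rfl⟩
    refine ⟨n.drop (k + 1), ?_⟩
    have h1 : n.take k ++ ['/'] = n.take (k + 1) := by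
      rw [List.take_add_one]
      simp [List.getElem?_eq_getElem hk, hs]
    rw [h1, List.take_append_drop]

-- core: min-position over a key list = first list element whose chars are a key
theorem core_min_eq_find (cps : List String) (K : List (List Char)) :
    (match K.foldl (considerB (firstIndexB cps)) none with
      | none => none
      | some b => some b.2)
      = cps.find? (fun cp => decide (cp.toList ∈ K)) := by
  rw [foldl_considerB_eq]
  cases hf : cps.find? (fun cp => decide (cp.toList ∈ K)) with
  | none =>
    have hnone : candsOf (firstIndexB cps) K = [] := by
      unfold candsOf
      rw [List.filterMap_eq_nil_iff]
      intro x hx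
      rw [get?_firstIndexB]
      have hfi : List.findIdx? (fun cp => cp == String.ofList x) cps = none := by
        rw [List.findIdx?_eq_none_iff]
        intro cp hcp
        rw [beq_eq_false_iff_ne]
        intro hEq
        have hno := List.find?_eq_none.mp hf cp hcp
        apply hno
        subst hEq
        simpa using hx
      rw [hfi]
      rfl
    rw [hnone]
    rfl
  | some cp =>
    have hf' := List.find?_eq_some_iff_getElem.mp hf
    obtain ⟨hp, i, hi, hcp, hjs⟩ := hf'
    have hmem : cp.toList ∈ K := of_decide_eq_true hp
    have hidx : List.findIdx? (fun c => c == cp) cps = some i := by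
      rw [List.findIdx?_eq_some_iff_getElem]
      refine ⟨hi, by simp [hcp], ?_⟩
      intro j hj hbe
      have hcj : cps[j] = cp := by simpa using hbe
      have hjx := hjs j hj
      rw [hcj, hp] at hjx
      simp at hjx
    have hget : (firstIndexB cps).get? cp = some ((i : Int)) := by
      rw [get?_firstIndexB, hidx]
      rfl
    have hmC : ((i : Int), cp) ∈ candsOf (firstIndexB cps) K := by
      unfold candsOf
      rw [List.mem_filterMap]
      refine ⟨cp.toList, hmem, ?_⟩
      rw [show String.ofList cp.toList = cp by simp, hget]
      rfl
    have hminall : ∀ c ∈ candsOf (firstIndexB cps) K,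
        c = ((i : Int), cp) ∨ ((i : Int)) < c.1 := by
      intro c hc
      unfold candsOf at hc
      rw [List.mem_filterMap] at hc
      obtain ⟨x, hxK, hx⟩ := hc
      cases hq : (firstIndexB cps).get? (String.ofList x) with
      | none => rw [hq] at hx; simp at hx
      | some iv =>
        rw [hq] at hx
        simp only [Option.map_some, Option.some.injEq] at hx
        rw [get?_firstIndexB] at hq
        cases hJ : List.findIdx? (fun cc => cc == String.ofList x) cps with
        | none => rw [hJ] at hq; simp at hq
        | some j =>
          rw [hJ] at hq
          simp only [Option.map_some, Option.some.injEq] at hq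
          have hJ' := List.findIdx?_eq_some_iff_getElem.mp hJ
          obtain ⟨hjlen, hje, _⟩ := hJ'
          have hcpsj : cps[j] = String.ofList x := by simpa using hje
          have hpj : decide ((cps[j]).toList ∈ K) = true := by
            rw [hcpsj]
            simpa using hxK
          have hij : i ≤ j := le_of_not_gt fun hlt => by
            have hjx := hjs j hlt
            rw [hpj] at hjx
            simp at hjx
          rcases eq_or_lt_of_le hij with heq | hlt
          · left
            subst heq
            have hxeq : String.ofList x = cp := by rw [← hcpsj, hcp]
            rw [← hx, ← hq, hxeq]
          · right
            rw [← hx, ← hq]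
            show (i : Int) < (j : Int)
            exact_mod_cast hlt
    have hrun := foldl_minCand_min (candsOf (firstIndexB cps) K) ((i : Int), cp)
      hminall hmC none (Or.inl rfl)
    rw [hrun]

theorem loops_eq (n : List Char) (cps : List String) :
    matchLoopA n cps =
      (match considerB (firstIndexB cps)
          ((PySem.List.enumerate n 0).foldl
            (fun best p =>
              if p.2 == '/' then
                considerB (firstIndexB cps) best (PySem.Chars.slice n none (some p.1))
              else best)
            none) n with
        | none => none
        | some b => some b.2) := by
  have hfold : (PySem.List.enumerate n 0).foldl
      (fun best p =>
        if p.2 == '/' then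
          considerB (firstIndexB cps) best (PySem.Chars.slice n none (some p.1))
        else best) none
      = (((PySem.List.enumerate n 0).filter (fun p => p.2 == '/')).map
          (fun p => PySem.Chars.slice n none (some p.1))).foldl
          (considerB (firstIndexB cps)) none := by
    rw [PySem.List.foldl_if_eq_foldl_filter, List.foldl_map]
  rw [hfold]
  set K := ((PySem.List.enumerate n 0).filter (fun p => p.2 == '/')).map
    (fun p => PySem.Chars.slice n none (some p.1)) with hK
  have happ : considerB (firstIndexB cps) (K.foldl (considerB (firstIndexB cps)) none) n
      = (K ++ [n]).foldl (considerB (firstIndexB cps)) none := by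
    rw [List.foldl_append]
    rfl
  rw [happ, core_min_eq_find cps (K ++ [n]), matchLoopA_eq_find]
  have hmem : ∀ cp : String, cp.toList ∈ K ↔ cp.toList ++ ['/'] <+: n := by
    intro cp
    rw [hK]
    constructor
    · intro hx
      simp only [List.mem_map, List.mem_filter, PySem.List.mem_enumerate_iff] at hx
      obtain ⟨p, ⟨⟨k, hk, rfl⟩, hsl⟩, hxeq⟩ := hx
      rw [slashPrefix_iff]
      refine ⟨k, hk, by simpa using hsl, ?_⟩
      rw [← hxeq]
      simp [PySem.Chars.slice_eq_listSlice]
    · intro hx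
      rw [slashPrefix_iff] at hx
      obtain ⟨k, hk, hsl, hcs⟩ := hx
      simp only [List.mem_map, List.mem_filter, PySem.List.mem_enumerate_iff]
      refine ⟨((0 : Int) + (k : Nat), n[k]), ⟨⟨k, hk, rfl⟩, by simpa using hsl⟩, ?_⟩
      rw [hcs]
      simp [PySem.Chars.slice_eq_listSlice]
  have hpred : (fun cp : String =>
        (n == cp.toList) || PySem.Chars.startswith n (cp.toList ++ ['/']))
      = (fun cp : String => decide (cp.toList ∈ K ++ [n])) := by
    funext cp
    apply Bool.eq_iff_iff.mpr
    simp only [Bool.or_eq_true, beq_iff_eq, PySem.Chars.startswith_iff, decide_eq_true_eq,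
      List.mem_append, List.mem_singleton, hmem]
    constructor
    · rintro (h | h)
      · exact Or.inr h.symm
      · exact Or.inl h
    · rintro (h | h)
      · exact Or.inr h
      · exact Or.inl h.symm
  rw [hpred]

-- ===== VERDICT (by name: the statement is the Claim_ definition above) =====
theorem match_case_path_py_spec : Claim_equal_match_case_path_py := by
  intro sample_path case_paths _
  unfold Spec_match_case_path_py match_case_path_py match_case_path_py_alt
  cases normaliseRelPath sample_path.toList with
  | none => rfl
  | some n => exact loops_eq n case_paths
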